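-- pv_equiv track=rewrite | github.com/absoluteunit1/LeetCode | Solutions/Other/Easy/709.py | solution
-- ===== SOURCE A (Python) =====
-- def solution(str1):
--     result = ""
--     for char in str1:
--         if ord(char) < 91 and ord(char) > 64:
--             result += chr(ord(char) + 32)
--         else:
--             result += char
--     return result
-- ===== SOURCE B (Python) =====
-- def solution(str1):
--     return str1.lower()
-- ===== Notes on version B (the rewrite author's own statement) =====
-- stated objective: idiomatic
-- what changed: Replaces the explicit per-character loop with ord-range branch and string concatenation by a single str.lower() call; agreement holds on the printable-ASCII domain.
import Mathlib
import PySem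

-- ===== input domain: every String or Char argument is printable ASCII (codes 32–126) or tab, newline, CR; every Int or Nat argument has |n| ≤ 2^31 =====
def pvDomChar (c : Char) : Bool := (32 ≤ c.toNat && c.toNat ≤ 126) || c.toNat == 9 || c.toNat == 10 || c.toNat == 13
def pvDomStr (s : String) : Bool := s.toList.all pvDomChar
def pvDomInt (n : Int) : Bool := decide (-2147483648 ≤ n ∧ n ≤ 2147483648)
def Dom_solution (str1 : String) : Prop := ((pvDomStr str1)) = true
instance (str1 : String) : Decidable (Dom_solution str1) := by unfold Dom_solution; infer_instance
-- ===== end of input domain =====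

-- B replaces A's per-character loop (ord-range branch + concatenation) by one str.lower() call (idiomatic).

-- ===== PORT A =====
def solution (str1 : String) : String :=
  str1.toList.foldl (fun result char =>
    if char.toNat < 91 ∧ char.toNat > 64 then
      result ++ (Char.ofNat (char.toNat + 32)).toString
    else
      result ++ char.toString) ""

-- ===== PORT B =====
def solution_alt (str1 : String) : String := PySem.Str.lower str1

-- ===== PRECONDITION & SPEC =====
def Spec_solution (str1 : String) (out : String) : Prop := out = solution_alt str1
instance (str1 : String) (out : String) : Decidable (Spec_solution str1 out) := by unfold Spec_solution; infer_instance

-- ===== CLAIM (what is proved, stated in full; the proofs are below) =====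
def Claim_equal_solution : Prop := ∀ (str1 : String), Dom_solution str1 → Spec_solution str1 (solution str1)

-- ===== LEMMAS AND PROOFS =====

theorem lowerChar_eq (c : Char) :
    (if c.toNat < 91 ∧ c.toNat > 64 then (Char.ofNat (c.toNat + 32)).toString
     else c.toString) = (PySem.Chars.lowerChar c).toString := by
  have h65 : ('A' ≤ c) ↔ (65 ≤ c.toNat) := by
    rw [Char.le_def, UInt32.le_iff_toNat_le]; exact Iff.rfl
  have h90 : (c ≤ 'Z') ↔ (c.toNat ≤ 90) := by
    rw [Char.le_def, UInt32.le_iff_toNat_le]; exact Iff.rfl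
  by_cases h : c.toNat < 91 ∧ c.toNat > 64
  · have hu : PySem.Chars.isupper c = true := by
      simp only [PySem.Chars.isupper, Bool.and_eq_true, decide_eq_true_eq, h65, h90]
      omega
    rw [if_pos h, PySem.Chars.lowerChar, if_pos hu]
  · have hu : PySem.Chars.isupper c = false := by
      simp only [PySem.Chars.isupper, Bool.and_eq_false_iff, decide_eq_false_iff_not, h65, h90]
      omega
    rw [if_neg h, PySem.Chars.lowerChar, hu]
    simp

theorem solution_foldl (l : List Char) (acc : String) :
    (l.foldl (fun result char =>
      if char.toNat < 91 ∧ char.toNat > 64 then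
        result ++ (Char.ofNat (char.toNat + 32)).toString
      else
        result ++ char.toString) acc) = acc ++ String.ofList (PySem.Chars.lower l) := by
  induction l generalizing acc with
  | nil =>
    simp only [List.foldl_nil, PySem.Chars.lower, List.map_nil]
    apply String.toList_injective; simp
  | cons c cs ih =>
    simp only [List.foldl_cons, ih, PySem.Chars.lower, List.map_cons]
    rw [show (if c.toNat < 91 ∧ c.toNat > 64 then
        acc ++ (Char.ofNat (c.toNat + 32)).toString
      else acc ++ c.toString) = acc ++ (PySem.Chars.lowerChar c).toString by
        rw [← lowerChar_eq]; split_ifs <;> rfl]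
    apply String.toList_injective
    simp

-- ===== VERDICT (by name: the statement is the Claim_ definition above) =====
theorem solution_spec : Claim_equal_solution := by
  intro str1 _
  unfold Spec_solution solution solution_alt PySem.Str.lower
  rw [solution_foldl]
  apply String.toList_injective
  simp
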